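-- pv_equiv track=rewrite | github.com/PurelyApplied/scrapyard | foobar/3/2_find_the_access_codes/solution.py | sievsum
-- ===== SOURCE A (Python) =====
-- def sievsum(masks):
--     count = 0
--     are_factors = { i : { j : mask_less(masks[i], masks[j])
--                           for j in range(i+1, len(masks))
--                       } for i in range(len(masks)) }
--     factors_before_here = {j : sum( are_factors[i].get(j) or 0
--                                     for i in range(len(masks)) )
--                            for j in range(len(masks))}
--     # |(i, j, k) | = sum_k( factors_before[j] are_factors[j][k] )
--     return sum( factors_before_here[j] * are_factors[j][k]
--                 for k in range(len(masks))
--                 for j in range(k)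
--             )
--
-- def mask_less(m1, m2):
--     return all(m1[i] <= m2[i] for i in range(len(m1)))
-- ===== SOURCE B (Python) =====
-- def sievsum(masks):
--     count = 0
--     before = []   # before[j] = number of i < j with mask_less(masks[i], masks[j])
--     for k in range(len(masks)):
--         bk = 0
--         for j in range(k):
--             if mask_less(masks[j], masks[k]):
--                 count += before[j]
--                 bk += 1
--         before.append(bk)
--     return count
--
-- def mask_less(m1, m2):
--     return all(m1[i] <= m2[i] for i in range(len(m1)))
-- ===== Notes on version B (the rewrite author's own statement) =====
-- stated objective: simpler
-- what changed: Replaces A's materialized dict-of-dicts are_factors, the factors_before table and the final triangular re-scan with one triangular pass that keeps a running list of predecessor counts and adds before[j] whenever masks[j] relates to masks[k], evaluating each mask_less pair exactly once.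
import Mathlib
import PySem

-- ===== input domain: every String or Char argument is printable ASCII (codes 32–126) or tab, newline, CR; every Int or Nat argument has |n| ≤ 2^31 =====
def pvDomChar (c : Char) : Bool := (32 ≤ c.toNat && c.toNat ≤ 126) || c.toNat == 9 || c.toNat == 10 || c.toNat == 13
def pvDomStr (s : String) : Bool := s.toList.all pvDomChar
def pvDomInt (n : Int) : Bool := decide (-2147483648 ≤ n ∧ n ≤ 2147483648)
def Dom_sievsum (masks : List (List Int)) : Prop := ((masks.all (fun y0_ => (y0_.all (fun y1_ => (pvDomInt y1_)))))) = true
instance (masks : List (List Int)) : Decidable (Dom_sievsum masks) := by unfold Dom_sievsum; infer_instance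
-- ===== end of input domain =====

-- B replaces A's dict-of-dicts are_factors / factors_before tables and final triangular re-scan by a
-- single triangular pass that keeps a running list of predecessor counts (each mask_less pair evaluated once).

-- mask_less(m1, m2); the defaulted index read m2.getD is exact on in-range indices — the
-- out-of-range case (Python IndexError) is excluded by Pre_sievsum.
def maskLess (m1 m2 : List Int) : Bool :=
  (List.range m1.length).all (fun i => decide (m1.getD i 0 ≤ m2.getD i 0))

-- ===== PORT A =====
def sievsum (masks : List (List Int)) : Int :=
  let n : Int := (masks.length : Int)
  -- dict comprehensions build by successive insertion; masks[i] is always in range here (pyGetD default unused)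
  let are_factors : PySem.Dict Int (PySem.Dict Int Bool) :=
    (PySem.List.pyRange 0 n 1).foldl (fun d i =>
      d.insert i ((PySem.List.pyRange (i + 1) n 1).foldl (fun d2 j =>
        d2.insert j (maskLess (PySem.List.pyGetD masks i []) (PySem.List.pyGetD masks j []))) PySem.Dict.empty)) PySem.Dict.empty
  -- are_factors[i] always has key i (getD default dict unused); `.get(j) or 0` contributes 1 only on `some true`
  let factors_before_here : PySem.Dict Int Int :=
    (PySem.List.pyRange 0 n 1).foldl (fun d j =>
      d.insert j (((PySem.List.pyRange 0 n 1).map (fun i =>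
        match (are_factors.getD i PySem.Dict.empty).get? j with
        | some true => (1 : Int)
        | _ => 0)).sum)) PySem.Dict.empty
  -- final sum; both keys j (in factors_before_here) and k (in are_factors[j], since j < k < n) are present
  ((PySem.List.pyRange 0 n 1).map (fun k =>
    ((PySem.List.pyRange 0 k 1).map (fun j =>
      (factors_before_here.getD j 0) *
        (if (are_factors.getD j PySem.Dict.empty).getD k false then (1 : Int) else 0))).sum)).sum

-- ===== PORT B =====
def sievsum_alt (masks : List (List Int)) : Int :=
  ((PySem.List.pyRange 0 (masks.length : Int) 1).foldl (fun st k =>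
    let inner := (PySem.List.pyRange 0 k 1).foldl (fun p j =>
      if maskLess (PySem.List.pyGetD masks j []) (PySem.List.pyGetD masks k []) then
        (p.1 + PySem.List.pyGetD st.2 j 0, p.2 + 1)
      else p) (st.1, (0 : Int))
    (inner.1, st.2 ++ [inner.2])) ((0 : Int), ([] : List Int))).1

-- ===== PRECONDITION & SPEC =====
-- Pre_ excludes exactly the inputs on which Python's mask_less raises IndexError for some pair p < q:
-- masks[q] strictly shorter than masks[p] while every compared entry up to len(masks[q]) satisfies ≤
-- (the generator in `all` then reads masks[q][len(masks[q])]). Both A and B raise there.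
def Pre_sievsum (masks : List (List Int)) : Prop :=
  ∀ p ∈ List.range masks.length, ∀ q ∈ List.range masks.length, p < q →
    ¬ ((masks.getD q []).length < (masks.getD p []).length ∧
       ∀ t ∈ List.range (masks.getD q []).length,
         (masks.getD p []).getD t 0 ≤ (masks.getD q []).getD t 0)
instance (masks : List (List Int)) : Decidable (Pre_sievsum masks) := by unfold Pre_sievsum; infer_instance

def pvWitness_sievsum : List (List Int) := [[1, 2], [1, 3], [2, 4]]

def Spec_sievsum (masks : List (List Int)) (out : Int) : Prop := out = sievsum_alt masks
instance (masks : List (List Int)) (out : Int) : Decidable (Spec_sievsum masks out) := by unfold Spec_sievsum; infer_instance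

-- ===== CLAIM (what is proved, stated in full; the proofs are below) =====
def Claim_equal_sievsum : Prop := ∀ (masks : List (List Int)), Dom_sievsum masks → Pre_sievsum masks → Spec_sievsum masks (sievsum masks)

-- ===== LEMMAS AND PROOFS =====

-- lookup in a dict built by inserting (i, g i) over a list: the value is g x whenever x occurred
theorem get?_foldl_insert {ν : Type} (g : Int → ν) (l : List Int) (x : Int) :
    ∀ d : PySem.Dict Int ν,
      (l.foldl (fun d i => d.insert i (g i)) d).get? x = if x ∈ l then some (g x) else d.get? x := by
  induction l with
  | nil => intro d; simp
  | cons a l ih =>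
    intro d
    simp only [List.foldl_cons, ih, List.mem_cons]
    by_cases hx : x ∈ l
    · simp [hx]
    · by_cases hxa : x = a
      · simp [hxa, PySem.Dict.get?_insert_self]
      · simp [hx, hxa, PySem.Dict.get?_insert_of_ne _ _ hxa]

theorem get?_foldl_insert_pyRange {ν : Type} (g : Int → ν) (a b x : Int) :
    ((PySem.List.pyRange a b 1).foldl (fun d i => d.insert i (g i)) PySem.Dict.empty).get? x
      = if a ≤ x ∧ x < b then some (g x) else none := by
  rw [get?_foldl_insert]
  simp [PySem.List.mem_pyRange_one]

-- the per-input 0/1 indicator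
def ind (masks : List (List Int)) (i j : Int) : Int :=
  if maskLess (PySem.List.pyGetD masks i []) (PySem.List.pyGetD masks j []) then 1 else 0

-- number of predecessors i < j whose mask divides into mask j (Python B's before[j])
def fcount (masks : List (List Int)) (j : Int) : Int :=
  ((PySem.List.pyRange 0 j 1).map (fun i => ind masks i j)).sum

-- the common triangular sum both ports compute
def triSum (masks : List (List Int)) (K : Int) : Int :=
  ((PySem.List.pyRange 0 K 1).map (fun k =>
    ((PySem.List.pyRange 0 k 1).map (fun j =>
      if maskLess (PySem.List.pyGetD masks j []) (PySem.List.pyGetD masks k []) then fcount masks j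
      else 0)).sum)).sum

-- A's "factors before j" inner sum collapses to fcount j
theorem fb_eq (masks : List (List Int)) (j : Int) (hj0 : 0 ≤ j) (hjn : j < (masks.length : Int)) :
    ((PySem.List.pyRange 0 (masks.length : Int) 1).map (fun i =>
      match (((PySem.List.pyRange 0 (masks.length : Int) 1).foldl (fun d i =>
          d.insert i ((PySem.List.pyRange (i + 1) (masks.length : Int) 1).foldl (fun d2 k =>
            d2.insert k (maskLess (PySem.List.pyGetD masks i []) (PySem.List.pyGetD masks k []))) PySem.Dict.empty)) PySem.Dict.empty).getD i PySem.Dict.empty).get? j with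
      | some true => (1 : Int)
      | _ => 0)).sum
    = fcount masks j := by
  have hterm : ∀ i ∈ PySem.List.pyRange 0 (masks.length : Int) 1,
      (match (((PySem.List.pyRange 0 (masks.length : Int) 1).foldl (fun d i =>
          d.insert i ((PySem.List.pyRange (i + 1) (masks.length : Int) 1).foldl (fun d2 k =>
            d2.insert k (maskLess (PySem.List.pyGetD masks i []) (PySem.List.pyGetD masks k []))) PySem.Dict.empty)) PySem.Dict.empty).getD i PySem.Dict.empty).get? j with
        | some true => (1 : Int)
        | _ => 0)
      = if i < j then ind masks i j else 0 := by
    intro i hi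
    rw [PySem.List.mem_pyRange_one] at hi
    rw [PySem.Dict.getD_eq_get?_getD, get?_foldl_insert_pyRange]
    rw [if_pos ⟨hi.1, hi.2⟩, Option.getD_some, get?_foldl_insert_pyRange]
    by_cases hij : i + 1 ≤ j
    · rw [if_pos ⟨hij, hjn⟩, if_pos (by omega : i < j)]
      unfold ind
      cases maskLess (PySem.List.pyGetD masks i []) (PySem.List.pyGetD masks j []) <;> rfl
    · rw [if_neg (by omega), if_neg (by omega)]
  rw [List.map_congr_left hterm,
    PySem.List.pyRange_one_append 0 j (masks.length : Int) hj0 (le_of_lt hjn),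
    List.map_append, List.sum_append]
  have hlow : ∀ i ∈ PySem.List.pyRange 0 j 1,
      (if i < j then ind masks i j else 0) = ind masks i j := by
    intro i hi
    rw [PySem.List.mem_pyRange_one] at hi
    exact if_pos hi.2
  have hhigh : ∀ i ∈ PySem.List.pyRange j (masks.length : Int) 1,
      (if i < j then ind masks i j else 0) = 0 := by
    intro i hi
    rw [PySem.List.mem_pyRange_one] at hi
    exact if_neg (by omega)
  rw [List.map_congr_left hlow, List.map_congr_left hhigh]
  simp [fcount]

-- A equals the common triangular sum
theorem sievsum_eq_triSum (masks : List (List Int)) :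
    sievsum masks = triSum masks (masks.length : Int) := by
  unfold sievsum triSum
  refine congrArg List.sum (List.map_congr_left ?_)
  intro k hk
  rw [PySem.List.mem_pyRange_one] at hk
  refine congrArg List.sum (List.map_congr_left ?_)
  intro j hj
  rw [PySem.List.mem_pyRange_one] at hj
  have hjn : j < (masks.length : Int) := lt_trans hj.2 hk.2
  have h0 : 0 ≤ j ∧ j < (masks.length : Int) := ⟨hj.1, hjn⟩
  have h1 : j + 1 ≤ k ∧ k < (masks.length : Int) := ⟨by omega, hk.2⟩
  rw [PySem.Dict.getD_eq_get?_getD (d := _), get?_foldl_insert_pyRange, if_pos h0,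
    Option.getD_some, fb_eq masks j hj.1 hjn,
    PySem.Dict.getD_eq_get?_getD, PySem.Dict.getD_eq_get?_getD,
    get?_foldl_insert_pyRange, if_pos h0, Option.getD_some,
    get?_foldl_insert_pyRange, if_pos h1, Option.getD_some]
  cases maskLess (PySem.List.pyGetD masks j []) (PySem.List.pyGetD masks k []) <;> simp

-- B's loop invariant: after processing 0..K-1 the state is (triSum K, [fcount 0, …, fcount (K-1)])
theorem alt_inv (masks : List (List Int)) (K : Nat) :
    (PySem.List.pyRange 0 (K : Int) 1).foldl (fun st k =>
      let inner := (PySem.List.pyRange 0 k 1).foldl (fun p j =>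
        if maskLess (PySem.List.pyGetD masks j []) (PySem.List.pyGetD masks k []) then
          (p.1 + PySem.List.pyGetD st.2 j 0, p.2 + 1)
        else p) (st.1, (0 : Int))
      (inner.1, st.2 ++ [inner.2])) ((0 : Int), ([] : List Int))
    = (triSum masks (K : Int), (PySem.List.pyRange 0 (K : Int) 1).map (fcount masks)) := by
  induction K with
  | zero => simp [triSum]
  | succ m ih =>
    have hcast : ((m + 1 : Nat) : Int) = (m : Int) + 1 := by push_cast; ring
    rw [hcast, PySem.List.pyRange_one_succ_right (by positivity), List.foldl_append, ih]
    simp only [List.foldl_cons, List.foldl_nil, List.map_append, List.map_cons, List.map_nil]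
    have hstep : (fun (p : Int × Int) j =>
        if maskLess (PySem.List.pyGetD masks j []) (PySem.List.pyGetD masks (m : Int) []) then
          (p.1 + PySem.List.pyGetD ((PySem.List.pyRange 0 (m : Int) 1).map (fcount masks)) j 0, p.2 + 1)
        else p)
      = (fun (p : Int × Int) j =>
        ((fun (a : Int) j => a + if maskLess (PySem.List.pyGetD masks j []) (PySem.List.pyGetD masks (m : Int) []) then PySem.List.pyGetD ((PySem.List.pyRange 0 (m : Int) 1).map (fcount masks)) j 0 else 0) p.1 j,
         (fun (b : Int) j => b + if maskLess (PySem.List.pyGetD masks j []) (PySem.List.pyGetD masks (m : Int) []) then 1 else 0) p.2 j)) := by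
      funext p j
      by_cases hb : maskLess (PySem.List.pyGetD masks j []) (PySem.List.pyGetD masks (m : Int) []) = true
      · dsimp only
        rw [if_pos hb, if_pos hb, if_pos hb]
      · dsimp only
        rw [if_neg hb, if_neg hb, if_neg hb, add_zero, add_zero]
    rw [hstep]
    beta_reduce
    rw [PySem.List.foldl_prod_mk
      (f := fun (a : Int) j => a +
        if maskLess (PySem.List.pyGetD masks j []) (PySem.List.pyGetD masks (m : Int) []) then
          PySem.List.pyGetD ((PySem.List.pyRange 0 (m : Int) 1).map (fcount masks)) j 0 else 0)
      (g := fun (b : Int) j => b +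
        if maskLess (PySem.List.pyGetD masks j []) (PySem.List.pyGetD masks (m : Int) []) then (1 : Int) else 0),
      PySem.List.foldl_add, PySem.List.foldl_add]
    have hget : ∀ j ∈ PySem.List.pyRange 0 (m : Int) 1,
        (if maskLess (PySem.List.pyGetD masks j []) (PySem.List.pyGetD masks (m : Int) []) then
          PySem.List.pyGetD ((PySem.List.pyRange 0 (m : Int) 1).map (fcount masks)) j 0 else 0)
        = (if maskLess (PySem.List.pyGetD masks j []) (PySem.List.pyGetD masks (m : Int) []) then
          fcount masks j else 0) := by
      intro j hj
      rw [PySem.List.mem_pyRange_one] at hj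
      rw [PySem.List.pyGetD_map_pyRange_of_nonneg _ _ _ _ hj.1 hj.2]
    rw [List.map_congr_left hget]
    dsimp only
    rw [Prod.mk.injEq]
    constructor
    · show triSum masks (m : Int) + _ = triSum masks ((m : Int) + 1)
      unfold triSum
      rw [PySem.List.pyRange_one_succ_right (by positivity), List.map_append, List.sum_append]
      simp
    · show (PySem.List.pyRange 0 (m : Int) 1).map (fcount masks) ++ [0 + _]
        = (PySem.List.pyRange 0 (m : Int) 1).map (fcount masks) ++ [fcount masks (m : Int)]
      rw [zero_add]
      unfold fcount ind
      rfl

theorem sievsum_eq_alt (masks : List (List Int)) : sievsum masks = sievsum_alt masks := by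
  rw [sievsum_eq_triSum]
  unfold sievsum_alt
  rw [alt_inv masks masks.length]

-- ===== VERDICT (by name: the statement is the Claim_ definition above) =====
theorem sievsum_spec : Claim_equal_sievsum := by
  intro masks _ _
  unfold Spec_sievsum
  exact sievsum_eq_alt masks
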